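-- pv_equiv track=rewrite | github.com/aloix123/Korepetycje | informator/73/zad73.py | zad1
-- ===== SOURCE A (Python) =====
-- def zad1(data):
--     resultcount=0
--     for word in data:
--         for leterindex in range(len(word)-1):
--             if word[leterindex]==word[leterindex+1]:
--                 resultcount+=1
--                 break
--     return resultcount
-- ===== SOURCE B (Python) =====
-- from itertools import groupby
--
-- def zad1(data):
--     return sum(1 for word in data
--                if any(sum(1 for _ in g) > 1 for _, g in groupby(word)))
-- ===== Notes on version B (the rewrite author's own statement) =====
-- stated objective: idiomatic
-- what changed: B collapses each word into runs of equal consecutive letters with itertools.groupby and counts words having a run longer than 1, instead of A's index-based scan over range(len(word)-1) with an accumulator and break.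
import Mathlib
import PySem

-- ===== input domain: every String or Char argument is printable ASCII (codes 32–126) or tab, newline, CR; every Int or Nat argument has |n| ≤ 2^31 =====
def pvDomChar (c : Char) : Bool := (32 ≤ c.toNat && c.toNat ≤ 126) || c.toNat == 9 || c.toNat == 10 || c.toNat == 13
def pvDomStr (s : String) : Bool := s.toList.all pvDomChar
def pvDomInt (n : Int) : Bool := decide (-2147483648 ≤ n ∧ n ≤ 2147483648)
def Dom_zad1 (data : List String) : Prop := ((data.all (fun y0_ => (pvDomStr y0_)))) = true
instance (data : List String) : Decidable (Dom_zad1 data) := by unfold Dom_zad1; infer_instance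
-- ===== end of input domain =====

-- B counts, per word, runs of equal consecutive letters (groupby) instead of A's
-- indexed adjacent-pair scan with break; idiomatic, same cost, return value proved equal.


-- ===== PORT A =====
-- inner 'for leterindex in range(len(word)-1): if …: resultcount += 1; break'
def zad1Inner (w : List Char) : List Int → Int → Int
  | [], acc => acc
  | i :: rest, acc =>
      if PySem.List.pyGet? w i = PySem.List.pyGet? w (i + 1) then acc + 1
      else zad1Inner w rest acc

def zad1 (data : List String) : Int :=
  data.foldl
    (fun resultcount word =>
      zad1Inner word.toList
        (PySem.List.pyRange 0 (PySem.Str.len word - 1) 1) resultcount)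
    0

-- ===== PORT B =====
-- itertools.groupby: split into maximal runs of equal consecutive letters
def pvRuns : List Char → List (List Char)
  | [] => []
  | c :: rest =>
      (c :: rest.takeWhile (· == c)) :: pvRuns (rest.dropWhile (· == c))
  termination_by w => w.length
  decreasing_by
    simp only [List.length_cons]
    exact Nat.lt_succ_of_le (List.length_dropWhile_le _ _)

-- sum(1 for word in data if any(len(run) > 1 for run in runs(word)))
def zad1_alt (data : List String) : Int :=
  (data.countP (fun word => (pvRuns word.toList).any (fun g => 1 < g.length)) : Int)

-- ===== PRECONDITION & SPEC =====
def Spec_zad1 (data : List String) (out : Int) : Prop := out = zad1_alt data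
instance (data : List String) (out : Int) : Decidable (Spec_zad1 data out) := by unfold Spec_zad1; infer_instance

-- ===== CLAIM (what is proved, stated in full; the proofs are below) =====
def Claim_equal_zad1 : Prop := ∀ (data : List String), Dom_zad1 data → Spec_zad1 data (zad1 data)

-- ===== LEMMAS AND PROOFS =====

-- reference predicate: the word has two equal adjacent letters
def pvAdj : List Char → Bool
  | [] => false
  | [_] => false
  | a :: b :: t => a == b || pvAdj (b :: t)

theorem pvRuns_adj : ∀ (w : List Char),
    (pvRuns w).any (fun g => 1 < g.length) = pvAdj w := by
  intro w
  induction w using pvRuns.induct with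
  | case1 => simp [pvRuns, pvAdj]
  | case2 c rest ih =>
    cases rest with
    | nil => simp [pvRuns, pvAdj]
    | cons d t =>
      by_cases h : d = c
      · subst h
        simp [pvRuns, pvAdj, List.takeWhile]
      · rw [pvRuns]
        have hdc : (d == c) = false := by simp [h]
        have ht : (d :: t).takeWhile (· == c) = [] := by
          simp [List.takeWhile, hdc]
        have hd : (d :: t).dropWhile (· == c) = d :: t := by
          simp [List.dropWhile, hdc]
        rw [hd] at ih
        rw [ht, hd]
        simp only [List.any_cons, ih, pvAdj]
        simp [Ne.symm h]

theorem pvInner_adj : ∀ (w : List Char) (acc : Int),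
    zad1Inner w (PySem.List.pyRange 0 ((w.length : Int) - 1) 1) acc
      = acc + (if pvAdj w then 1 else 0) := by
  have shift : ∀ (c : Char) (w : List Char) (idxs : List Int) (acc : Int),
      (∀ i ∈ idxs, 0 ≤ i) →
      zad1Inner (c :: w) (idxs.map (· + 1)) acc = zad1Inner w idxs acc := by
    intro c w idxs
    induction idxs with
    | nil => intro acc _; rfl
    | cons i rest ih =>
      intro acc hpos
      have hi : (0 : Int) ≤ i := hpos i (by simp)
      simp only [List.map_cons, zad1Inner]
      obtain ⟨n, rfl⟩ := Int.eq_ofNat_of_zero_le hi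
      have h1 : PySem.List.pyGet? (c :: w) ((n : Int) + 1) = PySem.List.pyGet? w (n : Int) :=
        PySem.List.pyGet?_cons_succ c w n
      have h2 : PySem.List.pyGet? (c :: w) ((n : Int) + 1 + 1) = PySem.List.pyGet? w ((n : Int) + 1) := by
        have h := PySem.List.pyGet?_cons_succ c w (n + 1)
        push_cast at h
        exact h
      rw [h1, h2]
      split
      · rfl
      · exact ih acc (fun j hj => hpos j (by simp [hj]))
  have range_shift : ∀ (n : Int), 0 ≤ n →
      PySem.List.pyRange 1 (n + 1) 1 = (PySem.List.pyRange 0 n 1).map (· + 1) := by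
    intro n hn
    rw [PySem.List.pyRange_one, PySem.List.pyRange_one]
    simp only [List.map_map]
    have h : n + 1 - 1 = n - 0 := by ring
    rw [h]
    exact List.map_congr_left (fun k _ => by simp [Function.comp]; ring)
  intro w
  induction w with
  | nil => intro acc; simp [zad1Inner, pvAdj, PySem.List.pyRange_one_eq_nil]
  | cons c rest ih =>
    intro acc
    cases rest with
    | nil =>
      simp [zad1Inner, pvAdj, PySem.List.pyRange_one_eq_nil]
    | cons d t =>
      have hlen : ((c :: d :: t).length : Int) - 1 = ((d :: t).length : Int) - 1 + 1 := by
        simp only [List.length_cons]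
        push_cast
        ring
      rw [hlen, PySem.List.pyRange_one_cons (by simp only [List.length_cons]; omega)]
      rw [zad1Inner]
      rw [PySem.List.pyGet?_zero_cons]
      have g1 : PySem.List.pyGet? (c :: d :: t) (0 + 1) = some d := by
        have h := PySem.List.pyGet?_cons_succ c (d :: t) 0
        push_cast at h
        rw [show (0 : Int) + 1 = 1 by norm_num, h, PySem.List.pyGet?_zero_cons]
      rw [g1]
      by_cases h : c = d
      · subst h; simp [pvAdj]
      · rw [if_neg (by simp [h])]
        have hr : PySem.List.pyRange (0 + 1) (((d :: t).length : Int) - 1 + 1) 1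
            = (PySem.List.pyRange 0 (((d :: t).length : Int) - 1) 1).map (· + 1) := by
          rw [show (0 : Int) + 1 = 1 by norm_num]
          exact range_shift _ (by simp only [List.length_cons]; push_cast; omega)
        rw [hr, shift c (d :: t) _ acc
          (fun i hi => (PySem.List.mem_pyRange_one.mp hi).1)]
        rw [ih acc]
        have ha : pvAdj (c :: d :: t) = pvAdj (d :: t) := by
          simp [pvAdj, h]
        rw [ha]

theorem pvFoldl_count : ∀ (data : List String) (acc : Int),
    data.foldl
      (fun resultcount word =>
        zad1Inner word.toList
          (PySem.List.pyRange 0 (PySem.Str.len word - 1) 1) resultcount) acc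
      = acc + (data.countP
          (fun word => (pvRuns word.toList).any (fun g => 1 < g.length)) : Int) := by
  intro data
  induction data with
  | nil => intro acc; simp
  | cons w rest ih =>
    intro acc
    simp only [List.foldl_cons, List.countP_cons]
    rw [show PySem.Str.len w = (w.toList.length : Int) by simp]
    rw [pvInner_adj, ih, pvRuns_adj]
    by_cases h : pvAdj w.toList = true <;> simp [h] <;> ring

-- ===== VERDICT (by name: the statement is the Claim_ definition above) =====
theorem zad1_spec : Claim_equal_zad1 := by
  unfold Claim_equal_zad1
  intro data _
  unfold Spec_zad1 zad1 zad1_alt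
  simpa using pvFoldl_count data 0
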